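-- pv_equiv track=rewrite | github.com/c1uc/leetcode | weekly/468/pC.py | minSplitMerge
-- ===== SOURCE A (Python) =====
-- from typing import List
--
-- def minSplitMerge(nums1: List[int], nums2: List[int]) -> int:
--     vis = set()
--     queue = []
--
--     queue.append((nums1, 0))
--     vis.add(tuple(nums1))
--     while queue:
--         current, ops = queue.pop(0)
--         if current == nums2:
--             return ops
--         for l in range(len(current)):
--             for r in range(l, len(current)):
--                 subarray = current[l:r+1]
--                 remaining = current[:l] + current[r+1:]
--
--                 for pos in range(len(remaining) + 1):
--                     new_state = remaining[:pos] + subarray + remaining[pos:]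
--                     if tuple(new_state) not in vis:
--                         if new_state == nums2:
--                             return ops + 1
--
--                         vis.add(tuple(new_state))
--                         queue.append((new_state, ops + 1))
--     return -1
-- ===== SOURCE B (Python) =====
-- from typing import List
--
--
-- def _neighbors(cur: List[int]):
--     n = len(cur)
--     for l in range(n):
--         for r in range(l, n):
--             sub = cur[l:r + 1]
--             rem = cur[:l] + cur[r + 1:]
--             for pos in range(len(rem) + 1):
--                 yield rem[:pos] + sub + rem[pos:]
--
--
-- def minSplitMerge(nums1: List[int], nums2: List[int]) -> int:
--     # Bidirectional BFS (meet in the middle): one block-move is its own inverse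
--     # up to relabeling, so the same neighbor generator serves both directions;
--     # expand the smaller frontier and stop when the two searches meet.
--     if nums1 == nums2:
--         return 0
--     distF = {tuple(nums1): 0}
--     distB = {tuple(nums2): 0}
--     frontF, frontB = [nums1], [nums2]
--     dF = dB = 0
--     while frontF and frontB:
--         if len(frontF) <= len(frontB):
--             dF += 1
--             nxt = []
--             for cur in frontF:
--                 for st in _neighbors(cur):
--                     k = tuple(st)
--                     if k in distF:
--                         continue
--                     if k in distB:
--                         return dF + distB[k]
--                     distF[k] = dF
--                     nxt.append(st)
--             frontF = nxt
--         else: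
--             dB += 1
--             nxt = []
--             for cur in frontB:
--                 for st in _neighbors(cur):
--                     k = tuple(st)
--                     if k in distB:
--                         continue
--                     if k in distF:
--                         return dB + distF[k]
--                     distB[k] = dB
--                     nxt.append(st)
--             frontB = nxt
--     return -1
-- ===== Notes on version B (the rewrite author's own statement) =====
-- stated objective: faster
-- what changed: Replaces A's single-source FIFO BFS over all states reachable from nums1 by a bidirectional (meet-in-the-middle) BFS that grows distance maps from nums1 and nums2 simultaneously, always expanding the smaller frontier and returning the sum of the two distances at the first meeting state; one block move is its own inverse up to relabeling, so the same neighbor generator serves both directions.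
import Mathlib
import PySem

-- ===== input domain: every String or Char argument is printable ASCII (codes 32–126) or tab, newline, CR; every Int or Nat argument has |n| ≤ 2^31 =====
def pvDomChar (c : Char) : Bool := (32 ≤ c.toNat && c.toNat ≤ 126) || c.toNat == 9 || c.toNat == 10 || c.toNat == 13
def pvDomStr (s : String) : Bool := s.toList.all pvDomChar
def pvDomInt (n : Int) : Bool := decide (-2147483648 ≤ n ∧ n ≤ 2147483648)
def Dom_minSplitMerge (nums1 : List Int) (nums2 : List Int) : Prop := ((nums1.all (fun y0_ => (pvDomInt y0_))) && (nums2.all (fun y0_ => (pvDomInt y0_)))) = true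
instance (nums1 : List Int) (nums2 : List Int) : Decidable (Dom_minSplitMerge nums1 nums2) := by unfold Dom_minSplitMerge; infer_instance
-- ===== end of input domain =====

-- BFS from nums1 and nums2 simultaneously; same return value is proved.

-- Shared helper: the triple l/r/pos loop generating one-move successors, in
-- Python's iteration order (both sources contain this identical generator).
def pvNeighbors (cur : List Int) : List (List Int) :=
  (PySem.List.pyRange 0 cur.length 1).flatMap (fun l =>
    (PySem.List.pyRange l cur.length 1).flatMap (fun r =>
      let sub := PySem.List.slice cur (some l) (some (r+1))
      let rem := PySem.List.slice cur none (some l) ++ PySem.List.slice cur (some (r+1)) none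
      (PySem.List.pyRange 0 ((rem.length : Int) + 1) 1).map (fun pos =>
        PySem.List.slice rem none (some pos) ++ sub ++ PySem.List.slice rem (some pos) none)))

-- ===== PORT A =====
-- A's inner `if tuple(new_state) not in vis: …` filtering of candidate
-- states; `.error nd` models the early `return` of distance nd on hitting nums2.
def pvScan (target : List Int) (nd : Int) :
    PySem.Set (List Int) → List (List Int) → List (List Int) →
    Except Int (PySem.Set (List Int) × List (List Int))
  | vis, acc, [] => .ok (vis, acc)
  | vis, acc, st :: rest =>
    if st ∈ vis then pvScan target nd vis acc rest
    else if st = target then .error nd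
    else pvScan target nd (PySem.Set.add vis st) (acc ++ [st]) rest

-- fuel: a totality guard only; ≥ 1 + number of distinct reachable states, so it
-- is never exhausted (pops ≤ 1 + enqueues ≤ #permutations ≤ length!).
def pvFuel (nums1 : List Int) : Nat := Nat.factorial nums1.length + 3

-- A's while loop: FIFO queue of (state, ops) pairs; check target at pop.
def aLoop (nums2 : List Int) :
    Nat → List (List Int × Int) → PySem.Set (List Int) → Option Int
  | 0, _, _ => none
  | _+1, [], _ => some (-1)
  | f+1, (cur, ops) :: qs, vis =>
    if cur = nums2 then some ops
    else match pvScan nums2 (ops+1) vis [] (pvNeighbors cur) with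
      | .error a => some a
      | .ok (vis', fresh) => aLoop nums2 f (qs ++ fresh.map (fun s => (s, ops+1))) vis'

def minSplitMerge (nums1 : List Int) (nums2 : List Int) : Int :=
  (aLoop nums2 (pvFuel nums1) [(nums1, 0)] (PySem.Set.add PySem.Set.empty nums1)).getD (-1)

-- ===== PORT B =====
-- B's inner `for st in _neighbors(cur)` loop of one expansion: skip states this
-- side already reached; `.error` models the `return nd + other[k]` on a meet;
-- otherwise record distance nd and collect into the next frontier.
def biScan (other : PySem.Dict (List Int) Int) (nd : Int) :
    PySem.Dict (List Int) Int → List (List Int) → List (List Int) →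
    Except Int (PySem.Dict (List Int) Int × List (List Int))
  | dme, acc, [] => .ok (dme, acc)
  | dme, acc, st :: rest =>
    if dme.contains st then biScan other nd dme acc rest
    else match other.get? st with
      | some v => .error (nd + v)
      | none => biScan other nd (dme.insert st nd) (acc ++ [st]) rest

-- B's `for cur in frontier:` loop of one expansion.
def biExpand (other : PySem.Dict (List Int) Int) (nd : Int) :
    PySem.Dict (List Int) Int → List (List Int) → List (List Int) →
    Except Int (PySem.Dict (List Int) Int × List (List Int))
  | dme, acc, [] => .ok (dme, acc)
  | dme, acc, cur :: rest =>
    match biScan other nd dme acc (pvNeighbors cur) with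
    | .error a => .error a
    | .ok (dme', acc') => biExpand other nd dme' acc' rest

-- fuel: totality guard only; ≥ 2 + number of distinct states either side can
-- ever record (≤ |nums1|! + |nums2|!), so it is never exhausted.
def pvBiFuel (nums1 nums2 : List Int) : Nat :=
  Nat.factorial nums1.length + Nat.factorial nums2.length + 4

-- B's `while frontF and frontB:` loop: expand the smaller frontier.
def biLoop (fuel : Nat) (distF : PySem.Dict (List Int) Int) (frontF : List (List Int)) (dF : Int)
    (distB : PySem.Dict (List Int) Int) (frontB : List (List Int)) (dB : Int) : Option Int :=
  match fuel with
  | 0 => none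
  | f+1 =>
    if frontF = [] ∨ frontB = [] then some (-1)
    else if frontF.length ≤ frontB.length then
      match biExpand distB (dF+1) distF [] frontF with
      | .error a => some a
      | .ok (distF', nxt) => biLoop f distF' nxt (dF+1) distB frontB dB
    else
      match biExpand distF (dB+1) distB [] frontB with
      | .error a => some a
      | .ok (distB', nxt) => biLoop f distF frontF dF distB' nxt (dB+1)

def minSplitMerge_alt (nums1 : List Int) (nums2 : List Int) : Int :=
  if nums1 = nums2 then 0
  else
    (biLoop (pvBiFuel nums1 nums2)
      (PySem.Dict.insert PySem.Dict.empty nums1 0) [nums1] 0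
      (PySem.Dict.insert PySem.Dict.empty nums2 0) [nums2] 0).getD (-1)

-- ===== PRECONDITION & SPEC =====
def Spec_minSplitMerge (nums1 : List Int) (nums2 : List Int) (out : Int) : Prop := out = minSplitMerge_alt nums1 nums2
instance (nums1 : List Int) (nums2 : List Int) (out : Int) : Decidable (Spec_minSplitMerge nums1 nums2 out) := by unfold Spec_minSplitMerge; infer_instance

-- ===== CLAIM (what is proved, stated in full; the proofs are below) =====
def Claim_equal_minSplitMerge : Prop := ∀ (nums1 : List Int) (nums2 : List Int), Dom_minSplitMerge nums1 nums2 → Spec_minSplitMerge nums1 nums2 (minSplitMerge nums1 nums2)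

-- ===== LEMMAS AND PROOFS =====



-- one BFS step: exact-length-n paths in the move graph
def ReachN : Nat → List Int → List Int → Prop
  | 0, s, t => s = t
  | n+1, s, t => ∃ m ∈ pvNeighbors s, ReachN n m t

def ReachLe (n : Nat) (s t : List Int) : Prop := ∃ k ≤ n, ReachN k s t

def Lvl (s : List Int) (k : Nat) (x : List Int) : Prop :=
  ReachN k s x ∧ ∀ j < k, ¬ ReachN j s x

-- a move = swapping two adjacent blocks: manifestly symmetric characterization
theorem mem_nb_char (x y : List Int) :
    y ∈ pvNeighbors x ↔ x ≠ [] ∧ ∃ A B C D : List Int, x = A++B++C++D ∧ y = A++C++B++D := by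
  constructor
  · intro h
    unfold pvNeighbors at h
    simp only [List.mem_flatMap, List.mem_map] at h
    obtain ⟨l, hl, r, hr, pos, hpos, hst⟩ := h
    rw [PySem.List.mem_pyRange_one] at hl hr hpos
    obtain ⟨hl0, hln⟩ := hl
    obtain ⟨hrl, hrn⟩ := hr
    obtain ⟨hp0, hpu⟩ := hpos
    have hxne : x ≠ [] := by
      intro he; subst he; simp at hln; omega
    refine ⟨hxne, ?_⟩
    set a := l.toNat with ha
    set b := (r+1).toNat with hb
    have hab : a ≤ b := by omega
    have hble : b ≤ x.length := by omega
    have hsub : PySem.List.slice x (some l) (some (r+1)) = (x.drop a).take (b - a) :=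
      PySem.List.slice_toNat x hl0 (by omega)
    have hto : PySem.List.slice x none (some l) = x.take a := PySem.List.slice_to x hl0
    have hfrom : PySem.List.slice x (some (r+1)) none = x.drop b :=
      PySem.List.slice_from x (by omega)
    rw [hsub, hto, hfrom] at hst
    set rem := x.take a ++ x.drop b with hrem
    set p := pos.toNat with hp
    have h1 : PySem.List.slice rem none (some pos) = rem.take p := PySem.List.slice_to rem hp0
    have h2 : PySem.List.slice rem (some pos) none = rem.drop p := PySem.List.slice_from rem hp0
    rw [h1, h2] at hst
    set sub := (x.drop a).take (b - a) with hsubdef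
    have hlenta : (x.take a).length = a := by simp; omega
    have hxdecomp : x = x.take a ++ sub ++ x.drop b := by
      rw [hsubdef]
      have : (x.drop a).take (b - a) ++ (x.drop a).drop (b - a) = x.drop a :=
        List.take_append_drop _ _
      have hdd : (x.drop a).drop (b - a) = x.drop b := by
        rw [List.drop_drop]; congr 1; omega
      rw [List.append_assoc]
      rw [hdd] at this
      rw [this, List.take_append_drop]
    by_cases hpa : p ≤ a
    · -- y = take p x ++ sub ++ ((take a x).drop p ++ drop b x)
      refine ⟨x.take p, (x.take a).drop p, sub, x.drop b, ?_, ?_⟩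
      · have : x.take p ++ (x.take a).drop p = x.take a := by
          have := List.take_append_drop p (x.take a)
          rwa [List.take_take, min_eq_left hpa] at this
        calc x = x.take a ++ sub ++ x.drop b := hxdecomp
          _ = x.take p ++ (x.take a).drop p ++ sub ++ x.drop b := by rw [this]
      · rw [← hst]
        have hta : rem.take p = x.take p := by
          rw [hrem, List.take_append]
          have : p - (x.take a).length = 0 := by omega
          rw [this, List.take_take, min_eq_left hpa]
          simp
        have hda : rem.drop p = (x.take a).drop p ++ x.drop b := by
          rw [hrem, List.drop_append]
          have : p - (x.take a).length = 0 := by omega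
          rw [this]
          simp
        rw [hta, hda]
        simp [List.append_assoc]
    · -- a < p : y = take a x ++ ((drop b x).take (p-a)) ++ sub ++ (drop b x).drop (p-a)
      push Not at hpa
      refine ⟨x.take a, sub, (x.drop b).take (p - a), (x.drop b).drop (p - a), ?_, ?_⟩
      · calc x = x.take a ++ sub ++ x.drop b := hxdecomp
          _ = x.take a ++ sub ++ ((x.drop b).take (p-a) ++ (x.drop b).drop (p-a)) := by
                rw [List.take_append_drop]
          _ = x.take a ++ sub ++ (x.drop b).take (p-a) ++ (x.drop b).drop (p-a) := by
                simp [List.append_assoc]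
      · rw [← hst]
        have hta : rem.take p = x.take a ++ (x.drop b).take (p - a) := by
          rw [hrem, List.take_append, List.take_take,
            min_eq_right (le_of_lt hpa)]
          simp
          omega
        have hda : rem.drop p = (x.drop b).drop (p - a) := by
          rw [hrem, List.drop_append,
            List.drop_eq_nil_of_le (by rw [hlenta]; omega : (x.take a).length ≤ p)]
          simp
          omega
        rw [hta, hda]
  · rintro ⟨hxne, A, B, C, D, hx, hy⟩
    by_cases hB : B = []
    · -- y = x: the identity move l=r=0, pos=0
      subst hB
      have hyx : y = x := by rw [hx, hy]; simp
      subst hyx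
      clear hx hy
      have hlen : 0 < y.length := List.length_pos_iff.mpr hxne
      unfold pvNeighbors
      simp only [List.mem_flatMap, List.mem_map]
      refine ⟨0, ?_, 0, ?_, 0, ?_, ?_⟩
      · rw [PySem.List.mem_pyRange_one]; omega
      · rw [PySem.List.mem_pyRange_one]; omega
      · rw [PySem.List.mem_pyRange_one]
        constructor
        · omega
        · have : (0:Int) ≤ ((PySem.List.slice y none (some 0) ++ PySem.List.slice y (some (0+1)) none).length : Int) := by positivity
          omega
      · have h01 : PySem.List.slice y (some 0) (some (0+1)) = (y.drop 0).take 1 := by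
          have := PySem.List.slice_toNat y (le_refl (0:Int)) (by omega : (0:Int) ≤ 0+1)
          simpa using this
        have ht0 : PySem.List.slice y none (some 0) = [] := by
          have := PySem.List.slice_to y (le_refl (0:Int)); simpa using this
        have hf1 : PySem.List.slice y (some (0+1)) none = y.drop 1 := by
          have := PySem.List.slice_from y (by omega : (0:Int) ≤ 0+1); simpa using this
        have ht0' : PySem.List.slice ([] ++ y.drop 1) none (some 0) = [] := by
          have := PySem.List.slice_to ([] ++ y.drop 1) (le_refl (0:Int)); simpa using this
        have hf0' : PySem.List.slice ([] ++ y.drop 1) (some 0) none = y.drop 1 := by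
          have := PySem.List.slice_from ([] ++ y.drop 1) (le_refl (0:Int)); simpa using this
        rw [h01, ht0, hf1, ht0', hf0']
        simp only [List.nil_append, List.drop_zero]
        exact List.take_append_drop 1 y
    · -- move the block B : l = |A|, r = |A|+|B|-1, pos = |A|+|C|
      unfold pvNeighbors
      simp only [List.mem_flatMap, List.mem_map]
      have hlx : x.length = A.length + B.length + C.length + D.length := by
        rw [hx]; simp; omega
      have hBpos : 0 < B.length := List.length_pos_iff.mpr hB
      have h1 : ((A.length:Int) + B.length - 1)+1 = ((A.length + B.length : Nat) : Int) := by
        push_cast; omega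
      have hsub : PySem.List.slice x (some (A.length:Int)) (some (((A.length:Int) + B.length - 1)+1)) = B := by
        rw [h1, PySem.List.slice_toNat x (by positivity) (by positivity)]
        simp only [Int.toNat_natCast]
        rw [hx]
        have hassoc : A ++ B ++ C ++ D = A ++ (B ++ (C ++ D)) := by simp
        rw [hassoc, List.drop_left]
        have hlab : A.length + B.length - A.length = B.length := by omega
        rw [hlab]
        exact List.take_left' rfl
      have hto : PySem.List.slice x none (some (A.length:Int)) = A := by
        rw [PySem.List.slice_to x (by positivity)]
        simp only [Int.toNat_natCast]
        rw [hx]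
        have hassoc : A ++ B ++ C ++ D = A ++ (B ++ (C ++ D)) := by simp
        rw [hassoc]
        exact List.take_left
      have hfrom : PySem.List.slice x (some (((A.length:Int) + B.length - 1)+1)) none = C ++ D := by
        rw [h1, PySem.List.slice_from x (by positivity)]
        simp only [Int.toNat_natCast]
        rw [hx]
        have hassoc : A ++ B ++ C ++ D = (A ++ B) ++ (C ++ D) := by simp
        rw [hassoc]
        have : (A ++ B).length = A.length + B.length := by simp
        rw [← this]
        exact List.drop_left
      refine ⟨(A.length : Int), ?_, (A.length : Int) + B.length - 1, ?_, (A.length : Int) + C.length, ?_, ?_⟩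
      · rw [PySem.List.mem_pyRange_one]; constructor
        · positivity
        · push_cast; omega
      · rw [PySem.List.mem_pyRange_one]; constructor
        · push_cast; omega
        · push_cast; omega
      · rw [PySem.List.mem_pyRange_one, hto, hfrom]
        constructor
        · positivity
        · simp only [List.length_append]; push_cast; omega
      · rw [hsub, hto, hfrom]
        have htk : PySem.List.slice (A ++ (C ++ D)) none (some ((A.length:Int) + C.length)) = A ++ C := by
          have h2 : (A.length:Int) + C.length = ((A.length + C.length : Nat) : Int) := by push_cast; ring
          rw [h2, PySem.List.slice_to _ (by positivity)]
          simp only [Int.toNat_natCast]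
          have hassoc : A ++ (C ++ D) = (A ++ C) ++ D := by simp
          rw [hassoc]
          exact List.take_left' (by simp)
        have hdr : PySem.List.slice (A ++ (C ++ D)) (some ((A.length:Int) + C.length)) none = D := by
          have h2 : (A.length:Int) + C.length = ((A.length + C.length : Nat) : Int) := by push_cast; ring
          rw [h2, PySem.List.slice_from _ (by positivity)]
          simp only [Int.toNat_natCast]
          have hassoc : A ++ (C ++ D) = (A ++ C) ++ D := by simp
          rw [hassoc]
          exact List.drop_left' (by simp)
        rw [htk, hdr, hy]

theorem nb_symm {x y : List Int} (h : y ∈ pvNeighbors x) : x ∈ pvNeighbors y := by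
  obtain ⟨hne, A, B, C, D, hx, hy⟩ := (mem_nb_char x y).mp h
  have hyne : y ≠ [] := by
    intro he
    apply hne
    have : y.length = x.length := by rw [hx, hy]; simp; omega
    rw [he] at this
    exact List.length_eq_zero_iff.mp this.symm
  exact (mem_nb_char y x).mpr ⟨hyne, A, C, B, D, hy, hx⟩

theorem nb_perm {x y : List Int} (h : y ∈ pvNeighbors x) : y.Perm x := by
  obtain ⟨hne, A, B, C, D, hx, hy⟩ := (mem_nb_char x y).mp h
  rw [hx, hy]
  have h1 : A++C++B++D = A++((C++B)++D) := by simp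
  have h2 : A++B++C++D = A++((B++C)++D) := by simp
  rw [h1, h2]
  exact List.Perm.append_left A ((List.perm_append_comm).append_right D)

theorem reach_snoc (n : Nat) (s t : List Int) :
    ReachN (n+1) s t ↔ ∃ m, ReachN n s m ∧ t ∈ pvNeighbors m := by
  induction n generalizing s with
  | zero =>
    constructor
    · rintro ⟨m, hm, hr⟩
      exact ⟨s, rfl, by cases hr; exact hm⟩
    · rintro ⟨m, hm, ht⟩
      cases hm
      exact ⟨t, ht, rfl⟩
  | succ n ih =>
    constructor
    · rintro ⟨m, hm, hr⟩
      obtain ⟨m', h1, h2⟩ := (ih m).mp hr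
      exact ⟨m', ⟨m, hm, h1⟩, h2⟩
    · rintro ⟨m', ⟨m, hm, h1⟩, h2⟩
      exact ⟨m, hm, (ih m).mpr ⟨m', h1, h2⟩⟩

theorem reach_trans {i j : Nat} {s m t : List Int}
    (h1 : ReachN i s m) (h2 : ReachN j m t) : ReachN (i+j) s t := by
  induction i generalizing s with
  | zero => cases h1; simpa using h2
  | succ i ih =>
    obtain ⟨m', hm', hr⟩ := h1
    have : ReachN (i+j) m' t := ih hr
    have hs : i + 1 + j = (i + j) + 1 := by omega
    rw [hs]
    exact ⟨m', hm', this⟩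

theorem reach_symm {n : Nat} {s t : List Int} (h : ReachN n s t) : ReachN n t s := by
  induction n generalizing s t with
  | zero => cases h; rfl
  | succ n ih =>
    obtain ⟨m, hm, hr⟩ := h
    exact (reach_snoc n t s).mpr ⟨m, ih hr, nb_symm hm⟩

theorem reach_split {i j : Nat} {s t : List Int} (h : ReachN (i+j) s t) :
    ∃ m, ReachN i s m ∧ ReachN j m t := by
  induction i generalizing s with
  | zero => exact ⟨s, rfl, by simpa using h⟩
  | succ i ih =>
    have hs : i + 1 + j = (i + j) + 1 := by omega
    rw [hs] at h
    obtain ⟨m', hm', hr⟩ := h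
    obtain ⟨m, h1, h2⟩ := ih hr
    exact ⟨m, ⟨m', hm', h1⟩, h2⟩

theorem reach_perm {n : Nat} {s t : List Int} (h : ReachN n s t) : t.Perm s := by
  induction n generalizing s with
  | zero => cases h; rfl
  | succ n ih =>
    obtain ⟨m, hm, hr⟩ := h
    exact (ih hr).trans (nb_perm hm)

theorem lvl_of_reach {k : Nat} {s x : List Int} (h : ReachN k s x) :
    ∃ j ≤ k, Lvl s j x := by
  induction k using Nat.strong_induction_on with
  | _ k ih =>
    by_cases hj : ∃ j < k, ReachN j s x
    · obtain ⟨j, hjk, hr⟩ := hj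
      obtain ⟨i, hik, hl⟩ := ih j hjk hr
      exact ⟨i, by omega, hl⟩
    · push Not at hj
      exact ⟨k, le_refl k, h, fun j hjk => hj j hjk⟩

theorem reachle_to_lvl {n : Nat} {s x : List Int} (h : ReachLe n s x) :
    ∃ k ≤ n, Lvl s k x := by
  obtain ⟨k, hk, hr⟩ := h
  obtain ⟨j, hj, hl⟩ := lvl_of_reach hr
  exact ⟨j, by omega, hl⟩

theorem lvl_unique {s t : List Int} {k k' : Nat} (h1 : Lvl s k t) (h2 : Lvl s k' t) : k = k' := by
  rcases lt_trichotomy k k' with h | h | h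
  · exact absurd h1.1 (h2.2 k h)
  · exact h
  · exact absurd h2.1 (h1.2 k' h)

theorem lvl_stab {s : List Int} {a : Nat} (h : ∀ x, ¬ Lvl s a x) :
    ∀ n x, ReachN n s x → ∃ k < a, ReachN k s x := by
  intro n
  induction n using Nat.strong_induction_on with
  | _ n ih =>
    intro x hr
    by_cases hna : n < a
    · exact ⟨n, hna, hr⟩
    · have hsplit : a + (n - a) = n := by omega
      rw [← hsplit] at hr
      obtain ⟨m, h1, h2⟩ := reach_split hr
      have := h m
      unfold Lvl at this
      push Not at this
      obtain ⟨j, hja, hjr⟩ := this h1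
      have h3 : ReachN (j + (n - a)) s x := reach_trans hjr h2
      have hlt : j + (n - a) < n := by omega
      exact ih (j + (n-a)) hlt x h3

-- ---- layered (whole-frontier) reformulation of A's queue BFS, proof-side only ----
def pvLayer (nums2 : List Int) (nd : Int) :
    PySem.Set (List Int) → List (List Int) → List (List Int) →
    Except Int (PySem.Set (List Int) × List (List Int))
  | vis, acc, [] => .ok (vis, acc)
  | vis, acc, cur :: rest =>
    match pvScan nums2 nd vis acc (pvNeighbors cur) with
    | .error a => .error a
    | .ok (vis', acc') => pvLayer nums2 nd vis' acc' rest

def pvLayered (nums2 : List Int) :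
    Nat → List (List Int) → PySem.Set (List Int) → Int → Option Int
  | 0, _, _, _ => none
  | _+1, [], _, _ => some (-1)
  | f+1, c :: rest, vis, d =>
    match pvLayer nums2 (d+1) vis [] (c :: rest) with
    | .error a => some a
    | .ok (vis', nxt) => pvLayered nums2 f nxt vis' (d+1)

-- pvScan with a nonempty accumulator = pvScan with [], then append
theorem pvScan_acc (target : List Int) (nd : Int) (ns : List (List Int)) :
    ∀ (vis : PySem.Set (List Int)) (acc : List (List Int)),
    pvScan target nd vis acc ns =
      match pvScan target nd vis [] ns with
      | .error a => .error a
      | .ok (v, fr) => .ok (v, acc ++ fr) := by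
  induction ns with
  | nil => intro vis acc; simp [pvScan]
  | cons st rest ih =>
    intro vis acc
    by_cases h1 : st ∈ vis
    · simp only [pvScan, if_pos h1]; exact ih vis acc
    · by_cases h2 : st = target
      · subst h2; simp [pvScan, h1]
      · simp only [pvScan, if_neg h1, if_neg h2]
        rw [ih _ (acc ++ [st]), ih _ ([] ++ [st])]
        cases hr : pvScan target nd (PySem.Set.add vis st) [] rest with
        | error a => simp
        | ok p => simp

-- what a successful pvScan produces
theorem pvScan_ok (target : List Int) (nd : Int) (ns : List (List Int)) :
    ∀ (vis : PySem.Set (List Int)) (acc v' : List (List Int)) (out : List (List Int)),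
    pvScan target nd vis acc ns = .ok (v', out) →
    ∃ fr, out = acc ++ fr ∧ v' = vis ++ fr ∧ (vis.Nodup → v'.Nodup) ∧
      ∀ x ∈ fr, x ∈ ns ∧ x ≠ target := by
  induction ns with
  | nil =>
    intro vis acc v' out h
    simp only [pvScan, Except.ok.injEq, Prod.mk.injEq] at h
    obtain ⟨rfl, rfl⟩ := h
    exact ⟨[], by simp⟩
  | cons st rest ih =>
    intro vis acc v' out h
    by_cases h1 : st ∈ vis
    · rw [pvScan, if_pos h1] at h
      obtain ⟨fr, h2, h3, h4, h5⟩ := ih vis acc v' out h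
      exact ⟨fr, h2, h3, h4, fun x hx => ⟨List.mem_cons_of_mem _ (h5 x hx).1, (h5 x hx).2⟩⟩
    · by_cases h2 : st = target
      · rw [pvScan, if_neg h1, if_pos h2] at h; exact absurd h (by simp)
      · rw [pvScan, if_neg h1, if_neg h2, PySem.Set.add_of_not_mem h1] at h
        obtain ⟨fr, h3, h4, h5, h6⟩ := ih _ _ _ _ h
        refine ⟨st :: fr, by simpa using h3, by simpa using h4, ?_, ?_⟩
        · intro hnd
          apply h5
          rw [List.nodup_append]
          refine ⟨hnd, List.nodup_singleton _, ?_⟩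
          intro a ha b hb
          rw [List.mem_singleton] at hb
          subst hb
          exact fun he => h1 (he ▸ ha)
        · intro x hx
          rcases List.mem_cons.1 hx with rfl | hx
          · exact ⟨List.mem_cons_self, h2⟩
          · exact ⟨List.mem_cons_of_mem _ (h6 x hx).1, (h6 x hx).2⟩

-- in the ok case every scanned state ends up visited
theorem pvScan_ok_mem (target : List Int) (nd : Int) (ns : List (List Int)) :
    ∀ (vis acc v' out : List (List Int)),
    pvScan target nd vis acc ns = .ok (v', out) →
    ∀ x ∈ ns, x ∈ v' := by
  induction ns with
  | nil => intro vis acc v' out h x hx; simp at hx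
  | cons st rest ih =>
    intro vis acc v' out h x hx
    obtain ⟨fr, _, hv, _, _⟩ := pvScan_ok target nd _ _ _ _ _ h
    by_cases h1 : st ∈ vis
    · rw [pvScan, if_pos h1] at h
      rcases List.mem_cons.1 hx with rfl | hx
      · rw [hv]; exact List.mem_append_left _ h1
      · exact ih vis acc v' out h x hx
    · by_cases h2 : st = target
      · rw [pvScan, if_neg h1, if_pos h2] at h; exact absurd h (by simp)
      · rw [pvScan, if_neg h1, if_neg h2, PySem.Set.add_of_not_mem h1] at h
        rcases List.mem_cons.1 hx with rfl | hx
        · obtain ⟨fr', _, hv', _, _⟩ := pvScan_ok target nd _ _ _ _ _ h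
          rw [hv']
          exact List.mem_append_left _ (List.mem_append_right _ (List.mem_singleton.mpr rfl))
        · exact ih _ _ v' out h x hx

-- an erroring pvScan returns exactly nd, on a scanned neighbor equal to the target
theorem pvScan_error (target : List Int) (nd : Int) (ns : List (List Int)) :
    ∀ (vis acc : List (List Int)) (r : Int),
    pvScan target nd vis acc ns = .error r → r = nd ∧ target ∈ ns := by
  induction ns with
  | nil => intro vis acc r h; simp [pvScan] at h
  | cons st rest ih =>
    intro vis acc r h
    by_cases h1 : st ∈ vis
    · rw [pvScan, if_pos h1] at h
      obtain ⟨hr, hm⟩ := ih vis acc r h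
      exact ⟨hr, List.mem_cons_of_mem _ hm⟩
    · by_cases h2 : st = target
      · rw [pvScan, if_neg h1, if_pos h2] at h
        simp at h
        exact ⟨h.symm, by rw [h2]; exact List.mem_cons_self⟩
      · rw [pvScan, if_neg h1, if_neg h2] at h
        obtain ⟨hr, hm⟩ := ih _ _ r h
        exact ⟨hr, List.mem_cons_of_mem _ hm⟩

-- what a successful pvLayer produces
theorem pvLayer_ok (nums2 : List Int) (nd : Int) (frontier : List (List Int)) :
    ∀ (vis acc v' out : List (List Int)),
    pvLayer nums2 nd vis acc frontier = .ok (v', out) →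
    ∃ fr, out = acc ++ fr ∧ v' = vis ++ fr ∧ (vis.Nodup → v'.Nodup) ∧
      ∀ x ∈ fr, (∃ c ∈ frontier, x ∈ pvNeighbors c) ∧ x ≠ nums2 := by
  induction frontier with
  | nil =>
    intro vis acc v' out h
    simp only [pvLayer, Except.ok.injEq, Prod.mk.injEq] at h
    exact ⟨[], by simp [← h.1, ← h.2]⟩
  | cons c rest ih =>
    intro vis acc v' out h
    rw [pvLayer] at h
    cases hs : pvScan nums2 nd vis acc (pvNeighbors c) with
    | error a => rw [hs] at h; exact absurd h (by simp)
    | ok p =>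
      rw [hs] at h
      obtain ⟨v1, a1⟩ := p
      obtain ⟨fr1, hf1, hv1, hnd1, hm1⟩ := pvScan_ok nums2 nd _ vis acc v1 a1 hs
      obtain ⟨fr2, hf2, hv2, hnd2, hm2⟩ := ih v1 a1 v' out h
      refine ⟨fr1 ++ fr2, by rw [hf2, hf1, List.append_assoc],
        by rw [hv2, hv1, List.append_assoc], fun hnd => hnd2 (hnd1 hnd), ?_⟩
      intro x hx
      rcases List.mem_append.1 hx with hx | hx
      · exact ⟨⟨c, List.mem_cons_self, (hm1 x hx).1⟩, (hm1 x hx).2⟩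
      · obtain ⟨⟨c', hc', hxc'⟩, hne⟩ := hm2 x hx
        exact ⟨⟨c', List.mem_cons_of_mem _ hc', hxc'⟩, hne⟩

-- in the ok case every neighbor of every frontier state ends up visited
theorem pvLayer_ok_mem (nums2 : List Int) (nd : Int) (frontier : List (List Int)) :
    ∀ (vis acc v' out : List (List Int)),
    pvLayer nums2 nd vis acc frontier = .ok (v', out) →
    ∀ c ∈ frontier, ∀ x ∈ pvNeighbors c, x ∈ v' := by
  induction frontier with
  | nil => intro vis acc v' out h c hc; simp at hc
  | cons c0 rest ih =>
    intro vis acc v' out h c hc x hx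
    rw [pvLayer] at h
    cases hs : pvScan nums2 nd vis acc (pvNeighbors c0) with
    | error a => rw [hs] at h; exact absurd h (by simp)
    | ok p =>
      rw [hs] at h
      obtain ⟨v1, a1⟩ := p
      rcases List.mem_cons.1 hc with rfl | hc
      · have hxm : x ∈ v1 := pvScan_ok_mem nums2 nd _ vis acc v1 a1 hs x hx
        obtain ⟨fr2, _, hv2, _, _⟩ := pvLayer_ok nums2 nd rest v1 a1 v' out h
        rw [hv2]; exact List.mem_append_left _ hxm
      · exact ih v1 a1 v' out h c hc x hx

-- an erroring pvLayer returns nd, on a neighbor of a frontier state equal to the target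
theorem pvLayer_error (nums2 : List Int) (nd : Int) (frontier : List (List Int)) :
    ∀ (vis acc : List (List Int)) (r : Int),
    pvLayer nums2 nd vis acc frontier = .error r →
    r = nd ∧ ∃ c ∈ frontier, nums2 ∈ pvNeighbors c := by
  induction frontier with
  | nil => intro vis acc r h; simp [pvLayer] at h
  | cons c rest ih =>
    intro vis acc r h
    rw [pvLayer] at h
    cases hs : pvScan nums2 nd vis acc (pvNeighbors c) with
    | error a =>
      rw [hs] at h
      simp at h
      obtain ⟨hr, hm⟩ := pvScan_error nums2 nd _ vis acc a hs
      exact ⟨h ▸ hr, c, List.mem_cons_self, hm⟩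
    | ok p =>
      rw [hs] at h
      obtain ⟨v1, a1⟩ := p
      obtain ⟨hr, c', hc', hm⟩ := ih v1 a1 r h
      exact ⟨hr, c', List.mem_cons_of_mem _ hc', hm⟩

-- layer simulation: A walks one queue layer exactly as pvLayer expands the frontier
theorem layer_sim (nums2 : List Int) (pending : List (List Int)) :
    ∀ (fA : Nat) (vis acc : List (List Int)) (d : Int),
    (∀ s ∈ pending, s ≠ nums2) →
    aLoop nums2 (fA + pending.length)
      (pending.map (fun s => (s, d)) ++ acc.map (fun s => (s, d+1))) vis
    = match pvLayer nums2 (d+1) vis acc pending with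
      | .error a => some a
      | .ok (v', nxt) => aLoop nums2 fA (nxt.map (fun s => (s, d+1))) v' := by
  induction pending with
  | nil => intro fA vis acc d _; simp [pvLayer]
  | cons cur rest ih =>
    intro fA vis acc d hp
    have hcur : cur ≠ nums2 := hp cur List.mem_cons_self
    have hfa : fA + (cur :: rest).length = (fA + rest.length) + 1 := by
      simp [List.length_cons]; omega
    rw [hfa]
    simp only [List.map_cons, List.cons_append, aLoop, if_neg hcur, pvLayer]
    rw [pvScan_acc nums2 (d+1) (pvNeighbors cur) vis acc]
    cases hs : pvScan nums2 (d+1) vis [] (pvNeighbors cur) with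
    | error a => simp
    | ok p =>
      obtain ⟨vis', fresh⟩ := p
      simp only [List.nil_append]
      have hq : rest.map (fun s => (s, d)) ++ (acc ++ fresh).map (fun s => (s, d+1)) =
          rest.map (fun s => (s, d)) ++ acc.map (fun s => (s, d+1)) ++
          fresh.map (fun s => (s, d+1)) := by
        simp [List.map_append]
      rw [← hq]
      exact ih fA vis' (acc ++ fresh) d (fun s hs => hp s (List.mem_cons_of_mem _ hs))

def pvN (nums1 : List Int) : Nat := (nums1.permutations.dedup).length

theorem pv_card_le (nums1 : List Int) (vis : List (List Int)) (hnd : vis.Nodup)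
    (hperm : ∀ s ∈ vis, s.Perm nums1) : vis.length ≤ pvN nums1 := by
  have h1 : vis.toFinset.card = vis.length := List.toFinset_card_of_nodup hnd
  have h2 : vis.toFinset ⊆ (nums1.permutations.dedup).toFinset := by
    intro x hx
    simp only [List.mem_toFinset, List.mem_dedup, List.mem_permutations] at *
    exact hperm x hx
  have h3 := Finset.card_le_card h2
  have h4 : (nums1.permutations.dedup).toFinset.card = (nums1.permutations.dedup).length :=
    List.toFinset_card_of_nodup (List.nodup_dedup _)
  unfold pvN; omega

-- main simulation: A's queue BFS = layered BFS, given enough fuel on both sides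
theorem main_sim (nums1 nums2 : List Int) :
    ∀ (k fA fB : Nat) (frontier vis : List (List Int)) (d : Int),
    vis.Nodup →
    (∀ s ∈ vis, s.Perm nums1) →
    (∀ s ∈ frontier, s ≠ nums2 ∧ s.Perm nums1) →
    pvN nums1 - vis.length ≤ k →
    frontier.length + (pvN nums1 - vis.length) + 1 ≤ fA →
    (pvN nums1 - vis.length) + 2 ≤ fB →
    aLoop nums2 fA (frontier.map (fun s => (s, d))) vis = pvLayered nums2 fB frontier vis d := by
  intro k
  induction k using Nat.strong_induction_on with
  | _ k ih =>
  intro fA fB frontier vis d hnd hvperm hfr hk hfA hfB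
  have hvle : vis.length ≤ pvN nums1 := pv_card_le nums1 vis hnd hvperm
  cases frontier with
  | nil =>
    obtain ⟨ga, rfl⟩ : ∃ g, fA = g + 1 := ⟨fA - 1, by omega⟩
    obtain ⟨gb, rfl⟩ : ∃ g, fB = g + 1 := ⟨fB - 1, by omega⟩
    simp [aLoop, pvLayered]
  | cons c rest =>
    have hlen1 : (c :: rest).length = rest.length + 1 := rfl
    obtain ⟨fA', hfa'⟩ : ∃ g, fA = g + (c :: rest).length :=
      ⟨fA - (c :: rest).length, by omega⟩
    obtain ⟨gb, rfl⟩ : ∃ g, fB = g + 1 := ⟨fB - 1, by omega⟩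
    subst hfa'
    have hmap : (c :: rest).map (fun s => (s, d)) =
        (c :: rest).map (fun s => (s, d)) ++ ([] : List (List Int)).map (fun s => (s, d+1)) := by
      simp
    rw [hmap, layer_sim nums2 (c :: rest) fA' vis [] d (fun s hs => (hfr s hs).1)]
    simp only [pvLayered]
    cases hlay : pvLayer nums2 (d+1) vis [] (c :: rest) with
    | error a => simp
    | ok p =>
      obtain ⟨v', nxt⟩ := p
      simp only
      obtain ⟨fr, hout, hv', hndp, hmem⟩ := pvLayer_ok nums2 (d+1) (c :: rest) vis [] v' nxt hlay
      rw [List.nil_append] at hout; subst hout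
      have hv'nd : v'.Nodup := hndp hnd
      have hv'perm : ∀ s ∈ v', s.Perm nums1 := by
        intro s hs
        rw [hv'] at hs
        rcases List.mem_append.1 hs with hs | hs
        · exact hvperm s hs
        · obtain ⟨⟨c', hc', hn⟩, _⟩ := hmem s hs
          exact (nb_perm hn).trans (hfr c' hc').2
      have hv'le : v'.length ≤ pvN nums1 := pv_card_le nums1 v' hv'nd hv'perm
      have hlenv : v'.length = vis.length + nxt.length := by rw [hv']; simp
      cases nxt with
      | nil =>
        obtain ⟨ga2, rfl⟩ : ∃ g, fA' = g + 1 := ⟨fA' - 1, by omega⟩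
        obtain ⟨gb2, rfl⟩ : ∃ g, gb = g + 1 := ⟨gb - 1, by omega⟩
        simp [aLoop, pvLayered]
      | cons y ys =>
        have hfrperm : ∀ s ∈ y :: ys, s ≠ nums2 ∧ s.Perm nums1 := by
          intro s hs
          obtain ⟨⟨c', hc', hn⟩, hne⟩ := hmem s hs
          exact ⟨hne, (nb_perm hn).trans (hfr c' hc').2⟩
        have hys : (y :: ys).length = ys.length + 1 := rfl
        have hterm : pvN nums1 - v'.length < k := by omega
        exact ih (pvN nums1 - v'.length) hterm fA' gb (y :: ys) v' (d+1) hv'nd hv'perm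
          hfrperm (le_refl _) (by omega) (by omega)

-- layered BFS returns the exact BFS level of the target, or -1 if unreachable
theorem pvLayered_correct (s t : List Int) (hst : s ≠ t) :
    ∀ (k fB : Nat) (frontier vis : List (List Int)) (a : Nat),
    vis.Nodup →
    (∀ x, x ∈ vis ↔ ReachLe a s x) →
    (∀ x, x ∈ frontier ↔ Lvl s a x) →
    ¬ ReachLe a s t →
    (∀ x ∈ vis, x.Perm s) →
    pvN s - vis.length ≤ k →
    (pvN s - vis.length) + 2 ≤ fB →
    ∃ r, pvLayered t fB frontier vis (a : Int) = some r ∧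
      ((∃ n, Lvl s n t ∧ r = (n:Int)) ∨ (r = -1 ∧ ∀ n, ¬ ReachN n s t)) := by
  intro k
  induction k using Nat.strong_induction_on with
  | _ k ih =>
  intro fB frontier vis a hnd h2 h4 h5 hperm hk hfB
  have hvle : vis.length ≤ pvN s := pv_card_le s vis hnd hperm
  cases frontier with
  | nil =>
    obtain ⟨gb, rfl⟩ : ∃ g, fB = g + 1 := ⟨fB - 1, by omega⟩
    refine ⟨-1, by simp [pvLayered], Or.inr ⟨rfl, ?_⟩⟩
    intro n hr
    obtain ⟨j, hja, hjr⟩ := lvl_stab (fun x hx => by simpa using (h4 x).mpr hx) n t hr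
    exact h5 ⟨j, by omega, hjr⟩
  | cons c rest =>
    obtain ⟨gb, rfl⟩ : ∃ g, fB = g + 1 := ⟨fB - 1, by omega⟩
    simp only [pvLayered]
    cases hlay : pvLayer t ((a:Int)+1) vis [] (c :: rest) with
    | error r =>
      obtain ⟨hr, c', hc', hm⟩ := pvLayer_error t _ (c :: rest) vis [] r hlay
      have hlvl : Lvl s (a+1) t := by
        refine ⟨(reach_snoc a s t).mpr ⟨c', ((h4 c').mp hc').1, hm⟩, ?_⟩
        intro j hj hjr
        exact h5 ⟨j, by omega, hjr⟩
      exact ⟨r, by simp, Or.inl ⟨a+1, hlvl, by rw [hr]; push_cast; ring⟩⟩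
    | ok p =>
      obtain ⟨v', nxt⟩ := p
      simp only
      obtain ⟨fr, hout, hv', hndp, hmem⟩ := pvLayer_ok t _ (c :: rest) vis [] v' nxt hlay
      rw [List.nil_append] at hout; subst hout
      have hv'nd : v'.Nodup := hndp hnd
      have hdisj : ∀ x ∈ nxt, x ∉ vis := by
        intro x hx hxv
        rw [hv'] at hv'nd
        exact (List.disjoint_of_nodup_append hv'nd) hxv hx
      have h2' : ∀ x, x ∈ v' ↔ ReachLe (a+1) s x := by
        intro x
        constructor
        · intro hx
          rw [hv'] at hx
          rcases List.mem_append.1 hx with hx | hx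
          · obtain ⟨j, hj, hjr⟩ := (h2 x).mp hx
            exact ⟨j, by omega, hjr⟩
          · obtain ⟨⟨c', hc', hn⟩, _⟩ := hmem x hx
            exact ⟨a+1, le_refl _, (reach_snoc a s x).mpr ⟨c', ((h4 c').mp hc').1, hn⟩⟩
        · intro hx
          obtain ⟨j, hj, hlvl⟩ := reachle_to_lvl hx
          by_cases hja : j ≤ a
          · have : x ∈ vis := (h2 x).mpr ⟨j, hja, hlvl.1⟩
            rw [hv']; exact List.mem_append_left _ this
          · have hj1 : j = a + 1 := by omega
            subst hj1
            obtain ⟨m, hmr, hmn⟩ := (reach_snoc a s x).mp hlvl.1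
            obtain ⟨i, hia, hilvl⟩ := lvl_of_reach hmr
            by_cases hieq : i = a
            · subst hieq
              have hmf : m ∈ c :: rest := (h4 m).mpr hilvl
              exact pvLayer_ok_mem t _ (c :: rest) vis [] v' nxt hlay m hmf x hmn
            · exfalso
              have : ReachN (i+1) s x := (reach_snoc i s x).mpr ⟨m, hilvl.1, hmn⟩
              exact hlvl.2 (i+1) (by omega) this
      have h4' : ∀ x, x ∈ nxt ↔ Lvl s (a+1) x := by
        intro x
        constructor
        · intro hx
          obtain ⟨⟨c', hc', hn⟩, _⟩ := hmem x hx
          refine ⟨(reach_snoc a s x).mpr ⟨c', ((h4 c').mp hc').1, hn⟩, ?_⟩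
          intro j hj hjr
          exact (fun hv => hdisj x hx hv) ((h2 x).mpr ⟨j, by omega, hjr⟩)
        · intro hlvl
          have hxv : x ∈ v' := (h2' x).mpr ⟨a+1, le_refl _, hlvl.1⟩
          rw [hv'] at hxv
          rcases List.mem_append.1 hxv with hx | hx
          · exact absurd ((h2 x).mp hx) (by
              rintro ⟨j, hj, hjr⟩
              exact hlvl.2 j (by omega) hjr)
          · exact hx
      have h5' : ¬ ReachLe (a+1) s t := by
        rintro hre
        obtain ⟨j, hj, hlvl⟩ := reachle_to_lvl hre
        by_cases hja : j ≤ a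
        · exact h5 ⟨j, hja, hlvl.1⟩
        · have hj1 : j = a + 1 := by omega
          subst hj1
          have : t ∈ nxt := (h4' t).mpr hlvl
          exact (hmem t this).2 rfl
      have hv'perm : ∀ x ∈ v', x.Perm s := by
        intro x hx
        rw [hv'] at hx
        rcases List.mem_append.1 hx with hx | hx
        · exact hperm x hx
        · obtain ⟨⟨c', hc', hn⟩, _⟩ := hmem x hx
          have : c'.Perm s := by
            obtain ⟨j, _, hjr⟩ := (h2 c').mp ((h2 c').mpr ⟨a, le_refl _, ((h4 c').mp hc').1⟩)
            exact reach_perm hjr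
          exact (nb_perm hn).trans this
      have hv'le : v'.length ≤ pvN s := pv_card_le s v' hv'nd hv'perm
      have hlenv : v'.length = vis.length + nxt.length := by rw [hv']; simp
      have hcast : (a:Int) + 1 = ((a+1 : Nat) : Int) := by push_cast; ring
      cases nxt with
      | nil =>
        obtain ⟨gb2, rfl⟩ : ∃ g, gb = g + 1 := ⟨gb - 1, by omega⟩
        refine ⟨-1, by simp [pvLayered], Or.inr ⟨rfl, ?_⟩⟩
        intro n hr
        obtain ⟨j, hja, hjr⟩ := lvl_stab
          (fun x hx => by simpa using (h4' x).mpr hx) n t hr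
        exact h5' ⟨j, by omega, hjr⟩
      | cons y ys =>
        have hys : (y :: ys).length = ys.length + 1 := rfl
        have hterm : pvN s - v'.length < k := by omega
        rw [hcast]
        exact ih (pvN s - v'.length) hterm gb (y :: ys) v' (a+1) hv'nd h2' h4' h5'
          hv'perm (le_refl _) (by omega)

-- ---- B-side: one biScan pass characterized ----
theorem biScan_ok (other : PySem.Dict (List Int) Int) (nd : Int) (ns : List (List Int)) :
    ∀ (dme : PySem.Dict (List Int) Int) (acc : List (List Int))
      (dme' : PySem.Dict (List Int) Int) (out : List (List Int)),
    biScan other nd dme acc ns = .ok (dme', out) →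
    ∃ fresh, out = acc ++ fresh ∧
      (∀ x, x ∉ fresh → dme'.get? x = dme.get? x) ∧
      (∀ x ∈ fresh, dme'.get? x = some nd ∧ dme.get? x = none ∧ other.get? x = none ∧ x ∈ ns) ∧
      (∀ x ∈ ns, x ∈ fresh ∨ dme.get? x ≠ none) ∧
      (dme.keys.Nodup → dme'.keys.Nodup ∧ dme'.keys.length = dme.keys.length + fresh.length) := by
  induction ns with
  | nil =>
    intro dme acc dme' out h
    simp only [biScan, Except.ok.injEq, Prod.mk.injEq] at h
    exact ⟨[], by simp [← h.1, ← h.2]⟩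
  | cons st rest ih =>
    intro dme acc dme' out h
    by_cases h1 : dme.contains st = true
    · rw [biScan, if_pos h1] at h
      obtain ⟨fresh, ho, hi, hii, hiv, hnd⟩ := ih dme acc dme' out h
      have hsome : dme.get? st ≠ none := by
        intro he
        rw [PySem.Dict.get?_eq_none_iff_contains] at he
        rw [he] at h1
        exact Bool.false_ne_true h1
      refine ⟨fresh, ho, hi, fun x hx => ?_, fun x hx => ?_, hnd⟩
      · obtain ⟨ha, hb, hc, hd⟩ := hii x hx
        exact ⟨ha, hb, hc, List.mem_cons_of_mem _ hd⟩
      · rcases List.mem_cons.1 hx with rfl | hx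
        · exact Or.inr hsome
        · exact hiv x hx
    · rw [biScan, if_neg h1] at h
      cases hov : other.get? st with
      | some v => rw [hov] at h; exact absurd h (by simp)
      | none =>
        rw [hov] at h
        have hstnone : dme.get? st = none := by
          rw [PySem.Dict.get?_eq_none_iff_contains]
          simpa using h1
        obtain ⟨fresh, ho, hi, hii, hiv, hnd⟩ := ih _ _ dme' out h
        have hstf : st ∉ fresh := by
          intro hx
          have := (hii st hx).2.1
          rw [PySem.Dict.get?_insert_self] at this
          exact absurd this (by simp)
        refine ⟨st :: fresh, by simpa using ho, ?_, ?_, ?_, ?_⟩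
        · intro x hx
          have hxs : x ≠ st := fun he => hx (he ▸ List.mem_cons_self)
          have hxf : x ∉ fresh := fun hf => hx (List.mem_cons_of_mem _ hf)
          rw [hi x hxf, PySem.Dict.get?_insert_of_ne _ _ hxs]
        · intro x hx
          rcases List.mem_cons.1 hx with rfl | hx
          · refine ⟨?_, hstnone, hov, List.mem_cons_self⟩
            rw [hi x hstf, PySem.Dict.get?_insert_self]
          · obtain ⟨ha, hb, hc, hd⟩ := hii x hx
            have hxs : x ≠ st := by
              intro he
              rw [he, PySem.Dict.get?_insert_self] at hb
              exact absurd hb (by simp)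
            rw [PySem.Dict.get?_insert_of_ne _ _ hxs] at hb
            exact ⟨ha, hb, hc, List.mem_cons_of_mem _ hd⟩
        · intro x hx
          rcases List.mem_cons.1 hx with rfl | hx
          · exact Or.inl List.mem_cons_self
          · rcases hiv x hx with hf | hs
            · exact Or.inl (List.mem_cons_of_mem _ hf)
            · by_cases hxs : x = st
              · exact Or.inl (hxs ▸ List.mem_cons_self)
              · rw [PySem.Dict.get?_insert_of_ne _ _ hxs] at hs
                exact Or.inr hs
        · intro hknd
          have hkeys : (dme.insert st nd).keys = dme.keys ++ [st] :=
            PySem.Dict.keys_insert_of_not_contains _ _ (by simpa using h1)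
          have hknd' : (dme.insert st nd).keys.Nodup := by
            rw [hkeys, List.nodup_append]
            refine ⟨hknd, List.nodup_singleton _, ?_⟩
            intro a ha b hb
            rw [List.mem_singleton] at hb
            subst hb
            intro he
            subst he
            rw [← PySem.Dict.contains_iff_mem_keys] at ha
            exact h1 ha
          obtain ⟨hn1, hn2⟩ := hnd hknd'
          refine ⟨hn1, ?_⟩
          rw [hn2, hkeys]
          simp
          omega

theorem biScan_error (other : PySem.Dict (List Int) Int) (nd : Int) (ns : List (List Int)) :
    ∀ (dme : PySem.Dict (List Int) Int) (acc : List (List Int)) (r : Int),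
    biScan other nd dme acc ns = .error r →
    ∃ x ∈ ns, ∃ v, other.get? x = some v ∧ r = nd + v := by
  induction ns with
  | nil => intro dme acc r h; simp [biScan] at h
  | cons st rest ih =>
    intro dme acc r h
    by_cases h1 : dme.contains st = true
    · rw [biScan, if_pos h1] at h
      obtain ⟨x, hx, v, hv, hr⟩ := ih dme acc r h
      exact ⟨x, List.mem_cons_of_mem _ hx, v, hv, hr⟩
    · rw [biScan, if_neg h1] at h
      cases hov : other.get? st with
      | some v =>
        rw [hov] at h
        simp at h
        exact ⟨st, List.mem_cons_self, v, hov, h.symm⟩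
      | none =>
        rw [hov] at h
        obtain ⟨x, hx, v, hv, hr⟩ := ih _ _ r h
        exact ⟨x, List.mem_cons_of_mem _ hx, v, hv, hr⟩

theorem biExpand_ok (other : PySem.Dict (List Int) Int) (nd : Int) (frontier : List (List Int)) :
    ∀ (dme : PySem.Dict (List Int) Int) (acc : List (List Int))
      (dme' : PySem.Dict (List Int) Int) (out : List (List Int)),
    biExpand other nd dme acc frontier = .ok (dme', out) →
    ∃ FR, out = acc ++ FR ∧
      (∀ x, x ∉ FR → dme'.get? x = dme.get? x) ∧
      (∀ x ∈ FR, dme'.get? x = some nd ∧ dme.get? x = none ∧ other.get? x = none ∧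
        ∃ c ∈ frontier, x ∈ pvNeighbors c) ∧
      (∀ c ∈ frontier, ∀ x ∈ pvNeighbors c, x ∈ FR ∨ dme.get? x ≠ none) ∧
      (dme.keys.Nodup → dme'.keys.Nodup ∧ dme'.keys.length = dme.keys.length + FR.length) := by
  induction frontier with
  | nil =>
    intro dme acc dme' out h
    simp only [biExpand, Except.ok.injEq, Prod.mk.injEq] at h
    exact ⟨[], by simp [← h.1, ← h.2]⟩
  | cons c rest ih =>
    intro dme acc dme' out h
    rw [biExpand] at h
    cases hs : biScan other nd dme acc (pvNeighbors c) with
    | error a => rw [hs] at h; exact absurd h (by simp)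
    | ok p =>
      rw [hs] at h
      obtain ⟨d1, a1⟩ := p
      obtain ⟨f1, ho1, hi1, hii1, hiv1, hnd1⟩ := biScan_ok other nd _ dme acc d1 a1 hs
      obtain ⟨f2, ho2, hi2, hii2, hiv2, hnd2⟩ := ih d1 a1 dme' out h
      have hf1f2 : ∀ x ∈ f1, x ∉ f2 := by
        intro x hx hx2
        have h1 := (hii1 x hx).1
        have h2 := (hii2 x hx2).2.1
        rw [h1] at h2
        exact absurd h2 (by simp)
      refine ⟨f1 ++ f2, by rw [ho2, ho1, List.append_assoc], ?_, ?_, ?_, ?_⟩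
      · intro x hx
        have hx1 : x ∉ f1 := fun h' => hx (List.mem_append_left _ h')
        have hx2 : x ∉ f2 := fun h' => hx (List.mem_append_right _ h')
        rw [hi2 x hx2, hi1 x hx1]
      · intro x hx
        rcases List.mem_append.1 hx with hx | hx
        · obtain ⟨ha, hb, hc, hd⟩ := hii1 x hx
          rw [hi2 x (hf1f2 x hx)]
          exact ⟨ha, hb, hc, c, List.mem_cons_self, hd⟩
        · obtain ⟨ha, hb, hc, ⟨c', hc', hd⟩⟩ := hii2 x hx
          have hbb : dme.get? x = none := by
            by_cases hx1 : x ∈ f1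
            · exact (hii1 x hx1).2.1
            · rw [← hi1 x hx1]; exact hb
          exact ⟨ha, hbb, hc, c', List.mem_cons_of_mem _ hc', hd⟩
      · intro c' hc' x hx
        rcases List.mem_cons.1 hc' with rfl | hc'
        · rcases hiv1 x hx with hf | hsome
          · exact Or.inl (List.mem_append_left _ hf)
          · exact Or.inr hsome
        · rcases hiv2 c' hc' x hx with hf | hsome
          · exact Or.inl (List.mem_append_right _ hf)
          · by_cases hx1 : x ∈ f1
            · exact Or.inl (List.mem_append_left _ hx1)
            · rw [hi1 x hx1] at hsome
              exact Or.inr hsome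
      · intro hknd
        obtain ⟨hn1, hl1⟩ := hnd1 hknd
        obtain ⟨hn2, hl2⟩ := hnd2 hn1
        refine ⟨hn2, ?_⟩
        rw [hl2, hl1]
        simp
        omega

theorem biExpand_error (other : PySem.Dict (List Int) Int) (nd : Int) (frontier : List (List Int)) :
    ∀ (dme : PySem.Dict (List Int) Int) (acc : List (List Int)) (r : Int),
    biExpand other nd dme acc frontier = .error r →
    ∃ c ∈ frontier, ∃ x ∈ pvNeighbors c, ∃ v, other.get? x = some v ∧ r = nd + v := by
  induction frontier with
  | nil => intro dme acc r h; simp [biExpand] at h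
  | cons c rest ih =>
    intro dme acc r h
    rw [biExpand] at h
    cases hs : biScan other nd dme acc (pvNeighbors c) with
    | error a =>
      rw [hs] at h
      simp at h
      obtain ⟨x, hx, v, hv, hr⟩ := biScan_error other nd _ dme acc a hs
      exact ⟨c, List.mem_cons_self, x, hx, v, hv, h ▸ hr⟩
    | ok p =>
      rw [hs] at h
      obtain ⟨d1, a1⟩ := p
      obtain ⟨c', hc', x, hx, v, hv, hr⟩ := ih d1 a1 r h
      exact ⟨c', List.mem_cons_of_mem _ hc', x, hx, v, hv, hr⟩

-- one side of the bidirectional search: distances exact, complete through layer a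
def SideInv (u : List Int) (a : Nat) (dm : PySem.Dict (List Int) Int)
    (front : List (List Int)) : Prop :=
  dm.keys.Nodup ∧
  (∀ x v, dm.get? x = some v ↔ ∃ k : Nat, v = (k:Int) ∧ k ≤ a ∧ Lvl u k x) ∧
  (∀ x, x ∈ front ↔ Lvl u a x)

theorem sideinv_dom {u : List Int} {a : Nat} {dm : PySem.Dict (List Int) Int}
    {front : List (List Int)} (h : SideInv u a dm front) (x : List Int) :
    dm.get? x ≠ none ↔ ReachLe a u x := by
  constructor
  · intro hx
    obtain ⟨v, hv⟩ := Option.ne_none_iff_exists'.mp hx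
    obtain ⟨k, _, hk, hlvl⟩ := (h.2.1 x v).mp hv
    exact ⟨k, hk, hlvl.1⟩
  · intro hx
    obtain ⟨k, hk, hlvl⟩ := reachle_to_lvl hx
    rw [(h.2.1 x (k:Int)).mpr ⟨k, rfl, hk, hlvl⟩]
    simp

theorem sideinv_keyperm {u : List Int} {a : Nat} {dm : PySem.Dict (List Int) Int}
    {front : List (List Int)} (h : SideInv u a dm front) :
    ∀ x ∈ dm.keys, x.Perm u := by
  intro x hx
  have hne : dm.get? x ≠ none := by
    intro he
    rw [PySem.Dict.get?_eq_none_iff_not_mem_keys] at he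
    exact he hx
  obtain ⟨v, hv⟩ := Option.ne_none_iff_exists'.mp hne
  obtain ⟨k, _, _, hlvl⟩ := (h.2.1 x v).mp hv
  exact reach_perm hlvl.1

-- disjoint layer-complete domains force the two roots at least a+b+1 apart
theorem disjoint_lb {s t : List Int} {aF aB : Nat}
    (h : ∀ x, ReachLe aF s x → ReachLe aB t x → False) :
    ∀ n ≤ aF + aB, ¬ ReachN n s t := by
  intro n hn hr
  have hsplit : min aF n + (n - min aF n) = n := by omega
  rw [← hsplit] at hr
  obtain ⟨m, h1, h2⟩ := reach_split hr
  refine h m ⟨min aF n, by omega, h1⟩ ⟨n - min aF n, by omega, reach_symm h2⟩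

-- a side whose frontier died has seen its entire component: the roots are not connected
theorem no_reach_of_empty {u w : List Int} {aU aW : Nat}
    {dmU dmW : PySem.Dict (List Int) Int} {frontW : List (List Int)}
    (hU : SideInv u aU dmU []) (hW : SideInv w aW dmW frontW)
    (hdisj : ∀ x, dmU.get? x ≠ none → dmW.get? x = none) :
    ∀ n, ¬ ReachN n u w := by
  intro n hr
  obtain ⟨j, hja, hjr⟩ := lvl_stab (fun x hx => by simpa using (hU.2.2 x).mpr hx) n w hr
  have hUw : dmU.get? w ≠ none := (sideinv_dom hU w).mpr ⟨j, by omega, hjr⟩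
  have hWw : dmW.get? w ≠ none := (sideinv_dom hW w).mpr ⟨0, Nat.zero_le _, rfl⟩
  exact hWw (hdisj w hUw)

-- one bidirectional expansion: a meet returns the exact distance, otherwise the
-- expanded side's invariant advances one layer and the domains stay disjoint
theorem biStep {u w : List Int} {aU aW : Nat}
    {dmU dmW : PySem.Dict (List Int) Int} {frontU frontW : List (List Int)}
    (hU : SideInv u aU dmU frontU) (hW : SideInv w aW dmW frontW)
    (hdisj : ∀ x, dmU.get? x ≠ none → dmW.get? x = none) :
    (∀ r, biExpand dmW ((aU:Int)+1) dmU [] frontU = .error r →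
      ∃ n, Lvl u n w ∧ r = (n:Int)) ∧
    (∀ dmU' nxt, biExpand dmW ((aU:Int)+1) dmU [] frontU = .ok (dmU', nxt) →
      SideInv u (aU+1) dmU' nxt ∧
      (∀ x, dmU'.get? x ≠ none → dmW.get? x = none) ∧
      dmU'.keys.length = dmU.keys.length + nxt.length) := by
  have hlb : ∀ n ≤ aU + aW, ¬ ReachN n u w := by
    refine disjoint_lb (fun x hx1 hx2 => ?_)
    exact ((sideinv_dom hW x).mpr hx2) (hdisj x ((sideinv_dom hU x).mpr hx1))
  constructor
  · intro r herr
    obtain ⟨c, hc, x, hx, v, hv, hr⟩ := biExpand_error dmW _ frontU dmU [] r herr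
    obtain ⟨k, hk, hka, hklvl⟩ := (hW.2.1 x v).mp hv
    have hcx : ReachN (aU+1) u x :=
      (reach_snoc aU u x).mpr ⟨c, ((hU.2.2 c).mp hc).1, hx⟩
    have hreach : ReachN (aU+1+k) u w := reach_trans hcx (reach_symm hklvl.1)
    refine ⟨aU+1+k, ⟨hreach, ?_⟩, ?_⟩
    · intro j hj hjr
      exact hlb j (by omega) hjr
    · rw [hr, hk]; push_cast; ring
  · intro dmU' nxt hok
    obtain ⟨FR, hout, hi, hii, hiv, hnd⟩ := biExpand_ok dmW _ frontU dmU [] dmU' nxt hok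
    rw [List.nil_append] at hout; subst hout
    obtain ⟨hknd', hklen⟩ := hnd hU.1
    have hfr_lvl : ∀ x ∈ nxt, Lvl u (aU+1) x := by
      intro x hx
      obtain ⟨ha, hb, hc, ⟨c, hcf, hcn⟩⟩ := hii x hx
      refine ⟨(reach_snoc aU u x).mpr ⟨c, ((hU.2.2 c).mp hcf).1, hcn⟩, ?_⟩
      intro j hj hjr
      have : dmU.get? x ≠ none := (sideinv_dom hU x).mpr ⟨j, by omega, hjr⟩
      exact this hb
    have hlvl_fr : ∀ x, Lvl u (aU+1) x → x ∈ nxt := by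
      intro x hlvl
      obtain ⟨m, hmr, hmn⟩ := (reach_snoc aU u x).mp hlvl.1
      obtain ⟨i, hia, hilvl⟩ := lvl_of_reach hmr
      have hieq : i = aU := by
        by_contra hne
        exact hlvl.2 (i+1) (by omega) ((reach_snoc i u x).mpr ⟨m, hilvl.1, hmn⟩)
      subst hieq
      have hmf : m ∈ frontU := (hU.2.2 m).mpr hilvl
      rcases hiv m hmf x hmn with hf | hsome
      · exact hf
      · exfalso
        obtain ⟨v, hv⟩ := Option.ne_none_iff_exists'.mp hsome
        obtain ⟨k, _, hka, hklvl⟩ := (hU.2.1 x v).mp hv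
        exact hlvl.2 k (by omega) hklvl.1
    refine ⟨⟨hknd', ?_, ?_⟩, ?_, hklen⟩
    · intro x v
      constructor
      · intro hv
        by_cases hx : x ∈ nxt
        · have := (hii x hx).1
          rw [hv] at this
          obtain rfl : v = (aU:Int)+1 := by simpa using this
          exact ⟨aU+1, by push_cast; ring, le_refl _, hfr_lvl x hx⟩
        · rw [hi x hx] at hv
          obtain ⟨k, hk, hka, hklvl⟩ := (hU.2.1 x v).mp hv
          exact ⟨k, hk, by omega, hklvl⟩
      · rintro ⟨k, rfl, hka, hklvl⟩
        by_cases hk1 : k ≤ aU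
        · have hv : dmU.get? x = some (k:Int) := (hU.2.1 x (k:Int)).mpr ⟨k, rfl, hk1, hklvl⟩
          have hx : x ∉ nxt := by
            intro hx
            rw [(hii x hx).2.1] at hv
            exact absurd hv (by simp)
          rw [hi x hx, hv]
        · have hkeq : k = aU+1 := by omega
          subst hkeq
          have hx : x ∈ nxt := hlvl_fr x hklvl
          rw [(hii x hx).1]
          congr 1
    · intro x
      constructor
      · exact hfr_lvl x
      · exact hlvl_fr x
    · intro x hx
      by_cases hxf : x ∈ nxt
      · exact (hii x hxf).2.2.1
      · rw [hi x hxf] at hx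
        exact hdisj x hx

-- the bidirectional loop returns the exact BFS level of t from s, or -1
theorem biLoop_correct (s t : List Int) :
    ∀ (k fuel : Nat) (dmF : PySem.Dict (List Int) Int) (frontF : List (List Int)) (aF : Nat)
      (dmB : PySem.Dict (List Int) Int) (frontB : List (List Int)) (aB : Nat),
    SideInv s aF dmF frontF → SideInv t aB dmB frontB →
    (∀ x, dmF.get? x ≠ none → dmB.get? x = none) →
    (pvN s + pvN t) - (dmF.keys.length + dmB.keys.length) ≤ k →
    k + 2 ≤ fuel →
    ∃ r, biLoop fuel dmF frontF (aF:Int) dmB frontB (aB:Int) = some r ∧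
      ((∃ n, Lvl s n t ∧ r = (n:Int)) ∨ (r = -1 ∧ ∀ n, ¬ ReachN n s t)) := by
  intro k
  induction k using Nat.strong_induction_on with
  | _ k ih =>
  intro fuel dmF frontF aF dmB frontB aB hF hB hdisj hk hfuel
  obtain ⟨f, rfl⟩ : ∃ g, fuel = g + 1 := ⟨fuel - 1, by omega⟩
  have hdisj' : ∀ x, dmB.get? x ≠ none → dmF.get? x = none := by
    intro x hx
    by_contra hne
    exact hx (hdisj x hne)
  have hFle : dmF.keys.length ≤ pvN s := pv_card_le s dmF.keys hF.1 (sideinv_keyperm hF)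
  have hBle : dmB.keys.length ≤ pvN t := pv_card_le t dmB.keys hB.1 (sideinv_keyperm hB)
  by_cases hemp : frontF = [] ∨ frontB = []
  · refine ⟨-1, by rw [biLoop, if_pos hemp], Or.inr ⟨rfl, ?_⟩⟩
    rcases hemp with he | he
    · subst he; exact no_reach_of_empty hF hB hdisj
    · subst he
      intro n hr
      exact no_reach_of_empty hB hF hdisj' n (reach_symm hr)
  · push Not at hemp
    rw [biLoop, if_neg (by push Not; exact hemp)]
    by_cases hlen : frontF.length ≤ frontB.length
    · rw [if_pos hlen]
      obtain ⟨herr, hok⟩ := biStep hF hB hdisj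
      cases hex : biExpand dmB ((aF:Int)+1) dmF [] frontF with
      | error r =>
        obtain ⟨n, hlvl, hr⟩ := herr r hex
        exact ⟨r, by simp, Or.inl ⟨n, hlvl, hr⟩⟩
      | ok p =>
        obtain ⟨dmF', nxt⟩ := p
        obtain ⟨hF', hdisjF', hklen⟩ := hok dmF' nxt hex
        have hFle' : dmF'.keys.length ≤ pvN s :=
          pv_card_le s dmF'.keys hF'.1 (sideinv_keyperm hF')
        simp only
        have hcast : (aF:Int) + 1 = ((aF+1 : Nat) : Int) := by push_cast; ring
        rw [hcast]
        cases nxt with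
        | nil =>
          obtain ⟨f', rfl⟩ : ∃ g, f = g + 1 := ⟨f - 1, by omega⟩
          refine ⟨-1, ?_, Or.inr ⟨rfl, no_reach_of_empty hF' hB hdisjF'⟩⟩
          rw [biLoop, if_pos (Or.inl rfl)]
        | cons y ys =>
          have hys : (y :: ys).length = ys.length + 1 := rfl
          have hterm : (pvN s + pvN t) - (dmF'.keys.length + dmB.keys.length) < k := by omega
          obtain ⟨r, hr, hcase⟩ := ih _ hterm f dmF' (y :: ys) (aF+1) dmB frontB aB
            hF' hB hdisjF' (le_refl _) (by omega)
          exact ⟨r, hr, hcase⟩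
    · rw [if_neg hlen]
      obtain ⟨herr, hok⟩ := biStep hB hF hdisj'
      cases hex : biExpand dmF ((aB:Int)+1) dmB [] frontB with
      | error r =>
        obtain ⟨n, hlvl, hr⟩ := herr r hex
        exact ⟨r, by simp, Or.inl ⟨n, ⟨reach_symm hlvl.1,
          fun j hj hjr => hlvl.2 j hj (reach_symm hjr)⟩, hr⟩⟩
      | ok p =>
        obtain ⟨dmB', nxt⟩ := p
        obtain ⟨hB', hdisjB', hklen⟩ := hok dmB' nxt hex
        have hBle' : dmB'.keys.length ≤ pvN t :=
          pv_card_le t dmB'.keys hB'.1 (sideinv_keyperm hB')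
        simp only
        have hcast : (aB:Int) + 1 = ((aB+1 : Nat) : Int) := by push_cast; ring
        rw [hcast]
        have hdisjF : ∀ x, dmF.get? x ≠ none → dmB'.get? x = none := by
          intro x hx
          by_contra hne
          exact hx (hdisjB' x hne)
        cases nxt with
        | nil =>
          obtain ⟨f', rfl⟩ : ∃ g, f = g + 1 := ⟨f - 1, by omega⟩
          refine ⟨-1, ?_, Or.inr ⟨rfl, fun n hr => no_reach_of_empty hB' hF hdisjB' n (reach_symm hr)⟩⟩
          rw [biLoop, if_pos (Or.inr rfl)]
        | cons y ys =>
          have hys : (y :: ys).length = ys.length + 1 := rfl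
          have hterm : (pvN s + pvN t) - (dmF.keys.length + dmB'.keys.length) < k := by omega
          obtain ⟨r, hr, hcase⟩ := ih _ hterm f dmF frontF aF dmB' (y :: ys) (aB+1)
            hF hB' hdisjF (le_refl _) (by omega)
          exact ⟨r, hr, hcase⟩

-- ===== VERDICT (by name: the statement is the Claim_ definition above) =====
theorem minSplitMerge_spec : Claim_equal_minSplitMerge := by
  unfold Claim_equal_minSplitMerge
  intro nums1 nums2 _
  unfold Spec_minSplitMerge minSplitMerge minSplitMerge_alt
  have hvis0 : PySem.Set.add PySem.Set.empty nums1 = [nums1] := rfl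
  by_cases h : nums1 = nums2
  · subst h
    obtain ⟨g, hg⟩ : ∃ g, pvFuel nums1 = g + 1 := ⟨pvFuel nums1 - 1, by unfold pvFuel; omega⟩
    rw [hg, hvis0]
    simp [aLoop]
  · rw [if_neg h, hvis0]
    have hNs : pvN nums1 ≤ Nat.factorial nums1.length := by
      have h1 := List.Sublist.length_le (List.dedup_sublist (nums1.permutations))
      rw [List.length_permutations] at h1
      exact h1
    have hNt : pvN nums2 ≤ Nat.factorial nums2.length := by
      have h1 := List.Sublist.length_le (List.dedup_sublist (nums2.permutations))
      rw [List.length_permutations] at h1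
      exact h1
    -- A = layered BFS
    have hsim := main_sim nums1 nums2 (pvN nums1) (pvFuel nums1) (pvFuel nums1)
      [nums1] [nums1] 0
      (by simp) (by intro s hs; rw [List.mem_singleton] at hs; subst hs; exact List.Perm.refl _)
      (by intro s hs; rw [List.mem_singleton] at hs; subst hs; exact ⟨h, List.Perm.refl _⟩)
      (by omega)
      (by have hlen1 : ([nums1] : List (List Int)).length = 1 := rfl; unfold pvFuel; omega)
      (by have hlen1 : ([nums1] : List (List Int)).length = 1 := rfl; unfold pvFuel; omega)
    have hq : ([nums1].map (fun s => (s, (0:Int)))) = [(nums1, (0:Int))] := rfl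
    rw [hq] at hsim
    rw [hsim]
    -- layered BFS = exact level
    have hlvl0 : ∀ x, ReachN 0 nums1 x ↔ nums1 = x := by intro x; rfl
    obtain ⟨rA, hrA, hcaseA⟩ := pvLayered_correct nums1 nums2 h (pvN nums1) (pvFuel nums1)
      [nums1] [nums1] 0
      (by simp)
      (by
        intro x
        constructor
        · intro hx
          rw [List.mem_singleton] at hx
          exact ⟨0, le_refl _, by rw [hx]; exact rfl⟩
        · rintro ⟨k, hk, hr⟩
          interval_cases k
          rw [List.mem_singleton]
          exact ((hlvl0 x).mp hr).symm
        )
      (by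
        intro x
        constructor
        · intro hx
          rw [List.mem_singleton] at hx
          exact ⟨by rw [hx]; exact rfl, by omega⟩
        · rintro ⟨hr, _⟩
          rw [List.mem_singleton]
          exact ((hlvl0 x).mp hr).symm
        )
      (by
        rintro ⟨k, hk, hr⟩
        interval_cases k
        exact h ((hlvl0 nums2).mp hr))
      (by intro x hx; rw [List.mem_singleton] at hx; subst hx; exact List.Perm.refl _)
      (by have hlen1 : ([nums1] : List (List Int)).length = 1 := rfl; omega)
      (by have hlen1 : ([nums1] : List (List Int)).length = 1 := rfl; unfold pvFuel; omega)
    have h0cast : ((0:Nat):Int) = (0:Int) := rfl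
    rw [h0cast] at hrA
    rw [hrA]
    -- bidirectional BFS = exact level
    have hget1 : ∀ x v, (PySem.Dict.insert PySem.Dict.empty nums1 (0:Int)).get? x = some v ↔
        (x = nums1 ∧ v = 0) := by
      intro x v
      rw [PySem.Dict.get?_insert]
      split_ifs with he
      · simp [he, eq_comm]
      · simp [PySem.Dict.get?_empty, he]
    have hget2 : ∀ x v, (PySem.Dict.insert PySem.Dict.empty nums2 (0:Int)).get? x = some v ↔
        (x = nums2 ∧ v = 0) := by
      intro x v
      rw [PySem.Dict.get?_insert]
      split_ifs with he
      · simp [he, eq_comm]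
      · simp [PySem.Dict.get?_empty, he]
    have hSI : ∀ u : List Int, SideInv u 0 (PySem.Dict.insert PySem.Dict.empty u (0:Int)) [u] := by
      intro u
      refine ⟨?_, ?_, ?_⟩
      · exact PySem.Dict.nodup_keys_insert _ _ _ PySem.Dict.nodup_keys_empty
      · intro x v
        have hg : (PySem.Dict.insert PySem.Dict.empty u (0:Int)).get? x = some v ↔
            (x = u ∧ v = 0) := by
          rw [PySem.Dict.get?_insert]
          split_ifs with he
          · simp [he, eq_comm]
          · simp [PySem.Dict.get?_empty, he]
        rw [hg]
        constructor
        · rintro ⟨rfl, rfl⟩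
          exact ⟨0, rfl, le_refl _, by exact rfl, by omega⟩
        · rintro ⟨k, rfl, hk, hr, _⟩
          interval_cases k
          exact ⟨hr.symm, rfl⟩
      · intro x
        rw [List.mem_singleton]
        constructor
        · rintro rfl
          exact ⟨by exact rfl, by omega⟩
        · rintro ⟨hr, _⟩
          exact hr.symm
    obtain ⟨rB, hrB, hcaseB⟩ := biLoop_correct nums1 nums2 (pvN nums1 + pvN nums2)
      (pvBiFuel nums1 nums2)
      (PySem.Dict.insert PySem.Dict.empty nums1 0) [nums1] 0
      (PySem.Dict.insert PySem.Dict.empty nums2 0) [nums2] 0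
      (hSI nums1) (hSI nums2)
      (by
        intro x hx
        obtain ⟨v, hv⟩ := Option.ne_none_iff_exists'.mp hx
        obtain ⟨rfl, _⟩ := (hget1 x v).mp hv
        cases hg : (PySem.Dict.insert PySem.Dict.empty nums2 (0:Int)).get? x with
        | none => rfl
        | some w =>
          obtain ⟨he, _⟩ := (hget2 x w).mp hg
          exact absurd he h)
      (by omega) (by unfold pvBiFuel; omega)
    rw [h0cast] at hrB
    rw [hrB]
    -- the two characterized results agree
    rcases hcaseA with ⟨n, hn, rfl⟩ | ⟨rfl, hnone⟩
    · rcases hcaseB with ⟨n', hn', rfl⟩ | ⟨rfl, hnone⟩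
      · rw [lvl_unique hn hn']
      · exact absurd hn.1 (hnone n)
    · rcases hcaseB with ⟨n', hn', rfl⟩ | ⟨rfl, _⟩
      · exact absurd hn'.1 (hnone n')
      · rfl
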